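/- GENERATED by mk_final_copies.py from the proof of the farm's unit `decode_all.6` (farm:decode_all.6.1: Proof.lean) as the
   re-elaboration sweep compiled it — do not edit. -/
import Asan.CheckWalk
import Vorbis.Spec.Units.decode_all_6

/- SEGMENT 6 OF decode_all (103658H … the `jmp` to the epilogue's head, 13 instructions), in the farm's format: from `AtClosed st`
   (after stb_vorbis_close) over the call of put_header (the seventh argument pushed) to `AtEpi` with `rax = 32 + 4·st`. The walk
   starts at `v` in the middle of the function; `u` is the state at the function's entry. -/
open X86 X86.User Asan Vorbis Vorbis.Spec

set_option maxRecDepth 4000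
set_option maxHeartbeats 4000000

namespace Vorbis.Spec.decode_all_6

/-- **The caller's footprint through a callee's**: every window of the callee lies inside a window of the caller. -/
theorem seg6_through_callee {ws ws' : List Span} {m0 m1 m2 : Mem} (h : Mem.SameExcept ws m0 m1)
    (hs : Mem.SameExcept ws' m1 m2) (hsub : ∀ w ∈ ws', InSpans ws w.lo (w.hi - w.lo)) : Mem.SameExcept ws m0 m2 := by
  apply h.step_same hs
  intro w hw a h1 h2
  obtain ⟨w', hw', k1, k2⟩ := hsub w hw
  exact ⟨w', hw', by omega, by omega⟩

end Vorbis.Spec.decode_all_6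

open Vorbis.Spec.decode_all_6

/-- **Segment 6**: the call of put_header and the result `32 + 4·stored`. -/
theorem Vorbis.Spec.Worked.decode_all_6_ok : Vorbis.Spec.decode_all_6.Statement := by
  intro Lay hLay μ hμ u₀ hcode h_put others frames len u ret others' st v hat
  obtain ⟨j_rip, hfrm, c_r13, c_rbx, k_st, hstle⟩ := hat
  have he := hfrm.entry
  have he0 := he
  have hpre0 := hfrm.pre
  v_entry he
  obtain ⟨_, _, c_rsp, k_r15, k_r14, k_r13, k_r12, k_rbp, k_rbx, k_ret, k_out, hsame, j_code, j_inv, hinv, hfixed, hoffT⟩ := hfrm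
  have hput := h_put others' (decode_all.ownFrames u frames)
  clear h_put
  have w_rip := j_rip
  have w_eq := Vorbis.conv_code_eqOn j_code
  have hdf : v.flags .df = false := (show X86.User.abiInv _ from j_inv).1
  have hmx : v.mxcsr &&& 0x1F80 = 0x1F80 := (show X86.User.abiInv _ from j_inv).2
  have w_kept : RegsKept [.rsp] v v := RegsKept.refl _ _
  u_walk hcode [hμ.vendor] until [Vorbis.L.decode_all.at_10351d] span [Vorbis.L.textLo, Vorbis.L.textHi] side (v_side)
  case call_inv =>
    v_inv
  case pre_10367b =>
    -- the precondition of put_header: two stores since `v` (the seventh argument at `R − 248`, the return address at `R − 256`)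
    have e_rsp : (s_10367b.reg .rsp).toNat + 8 = (u.reg .rsp).toNat - 248 := by
      rw [w_rsp]
      u_omega
    have hlow : ShadowInv others' (decode_all.ownFrames u frames) ((u.reg .rsp).toNat - 248) v.mem :=
      hinv.lower (by omega) (by omega) (by omega)
    refine ⟨⟨?_, hoffT⟩, ?_, ?_⟩
    · rw [e_rsp, w_mem]
      refine ShadowInv.writeLE (ShadowInv.writeLE hlow _ _ _ ?_ ?_) _ _ _ ?_ ?_
      · u_omega
      · u_omega
      · u_omega
      · u_omega
    · rw [w_rdi]
      have hO : listBlk (fixedBlocks len) blockOUT := by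
        simp only [listBlk, fixedBlocks, List.mem_cons, true_or, or_true]
      refine LiveBytes.of_block (hfixed.blk _ hO) ?_ ?_
      · simp only [blockOUT]
        decide
      · simp only [blockOUT]
        decide
    · rw [w_rsp]
      u_omega
  case cont =>
    v_after_call w_rsp_10367b w_mem_10367b
    simp only [w_rdi_10367b] at w_same
    -- the stack slots through the two pushed words and the callee's footprint
    have q15 : UInt64.ofNat (s_10367br.mem.readLE (u.reg .rsp - 8) 8) = u.reg .r15 := by u_frame k_r15
    have q14 : UInt64.ofNat (s_10367br.mem.readLE (u.reg .rsp - 16) 8) = u.reg .r14 := by u_frame k_r14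
    have q13 : UInt64.ofNat (s_10367br.mem.readLE (u.reg .rsp - 24) 8) = u.reg .r13 := by u_frame k_r13
    have q12 : UInt64.ofNat (s_10367br.mem.readLE (u.reg .rsp - 32) 8) = u.reg .r12 := by u_frame k_r12
    have qbp : UInt64.ofNat (s_10367br.mem.readLE (u.reg .rsp - 40) 8) = u.reg .rbp := by u_frame k_rbp
    have qbx : UInt64.ofNat (s_10367br.mem.readLE (u.reg .rsp - 48) 8) = u.reg .rbx := by u_frame k_rbx
    have q0 : UInt64.ofNat (s_10367br.mem.readLE (u.reg .rsp) 8) = ret := by u_frame k_ret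
    have qout : s_10367br.mem.readLE (u.reg .rsp - 216) 8 = 4194304 := by u_frame k_out
    -- the footprint so far
    have hpush1 : Mem.SameExcept _ u.mem (v.mem.writeLE (u.reg .rsp - 248) 8 (UInt64.ofNat st).toNat) :=
      Mem.SameExcept.step_writeLE' (u.reg .rsp - 248) 8 _ hsame (by u_omega) (by u_same_side)
    have hpush2 : Mem.SameExcept _ u.mem ((v.mem.writeLE (u.reg .rsp - 248) 8 (UInt64.ofNat st).toNat).writeLE
        (u.reg .rsp - 256) 8 (UInt64.toNat (L.decode_all.cut7 + 40))) :=
      Mem.SameExcept.step_writeLE' (u.reg .rsp - 256) 8 _ hpush1 (by u_omega) (by u_same_side)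
    have hsame' := seg6_through_callee hpush2 w_same (by
      simp only [List.forall_mem_cons, List.not_mem_nil, false_imp_iff, implies_true, and_true, X86.User.inSpans_cons,
        X86.User.inSpans_nil, or_false]
      repeat' apply And.intro
      all_goals u_omega)
    -- the shadow layer: two stores below the shadow region, and the callee writes no shadow byte
    have hun : ShadowUntouched s_10367b.mem s_10367br.mem := w_post
    have hinv1 : ShadowInv others' (decode_all.ownFrames u frames) ((u.reg .rsp).toNat - 232) s_10367br.mem := by
      refine ShadowInv.untouched ?_ hun
      rw [w_mem_10367b]
      refine ShadowInv.writeLE (ShadowInv.writeLE hinv _ _ _ ?_ ?_) _ _ _ ?_ ?_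
      · u_omega
      · u_omega
      · u_omega
      · u_omega
    have c_r13' : s_10367br.reg .r13 = (u.reg .rsp - 184) >>> 3 := by
      rw [w_kept .r13 rfl]
      exact c_r13
    clear w_same w_post hun
    have hdf' := w_df
    have hmx' := w_mx
    u_walk hcode [hμ.vendor] until [Vorbis.L.decode_all.at_10351d] span [Vorbis.L.textLo, Vorbis.L.textHi] side (v_side)
    refine ReachVia.done ?_
    have hfrm' : decode_all.DFrame others frames len u₀ u ret others' s_10368c := by
      refine ⟨he0, hpre0, w_rsp, ?_, ?_, ?_, ?_, ?_, ?_, ?_, ?_, ?_, Vorbis.conv_code_in w_eq, ?_, ?_, hfixed, hoffT⟩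
      · rw [w_mem]
        exact q15
      · rw [w_mem]
        exact q14
      · rw [w_mem]
        exact q13
      · rw [w_mem]
        exact q12
      · rw [w_mem]
        exact qbp
      · rw [w_mem]
        exact qbx
      · rw [w_mem]
        exact q0
      · rw [w_mem]
        exact qout
      · rw [w_mem]
        exact hsame'
      · v_inv
      · rw [w_mem]
        exact hinv1
    refine ⟨w_rip, hfrm', ?_, ?_, ?_⟩
    · rw [w_kept .r13 rfl]
      exact c_r13
    · rw [w_rax]
      u_omega
    · rw [w_rax]
      u_omega
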